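-- pv_equiv track=rewrite | github.com/yahya-tamur/advent | python/a2019/17.py | intercalate
-- ===== SOURCE A (Python) =====
-- def intercalate(l, sep):
--     ans = list()
--     for i in l[:-1]:
--         ans.extend(i)
--         ans.append(sep)
--     if l:
--         ans.extend(l[-1])
--     return ans
-- ===== SOURCE B (Python) =====
-- def intercalate(l, sep):
--     out = [x for sub in l for x in [sep] + list(sub)]
--     return out[1:]
-- ===== Notes on version B (the rewrite author's own statement) =====
-- stated objective: alternative
-- what changed: B prepends sep uniformly to every sublist in one flat comprehension (no branching, no slice of l) and then drops the single leading sep with out[1:], instead of A's loop over l[:-1] with a separate final extend.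
import Mathlib
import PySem

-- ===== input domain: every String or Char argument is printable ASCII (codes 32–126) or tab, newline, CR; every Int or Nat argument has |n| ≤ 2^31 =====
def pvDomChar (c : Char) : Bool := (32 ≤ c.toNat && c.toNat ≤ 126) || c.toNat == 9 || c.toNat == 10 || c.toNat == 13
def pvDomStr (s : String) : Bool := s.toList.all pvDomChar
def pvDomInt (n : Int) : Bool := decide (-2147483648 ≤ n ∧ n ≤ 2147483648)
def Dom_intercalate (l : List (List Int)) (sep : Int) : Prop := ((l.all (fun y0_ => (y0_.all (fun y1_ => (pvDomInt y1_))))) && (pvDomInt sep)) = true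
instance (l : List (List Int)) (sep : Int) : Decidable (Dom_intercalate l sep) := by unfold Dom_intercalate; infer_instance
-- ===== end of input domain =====

-- B prepends sep to every sublist in one flat pass and drops the leading sep with out[1:], replacing A's l[:-1] loop plus final extend (objective: alternative; same cost).


-- ===== PORT A =====
def intercalate (l : List (List Int)) (sep : Int) : List Int :=
  let ans : List Int := (PySem.List.slice l none (some (-1))).foldl (fun ans i => ans ++ i ++ [sep]) []
  if l.isEmpty then ans
  else match PySem.List.pyGet? l (-1) with
    | some last => ans ++ last
    | none => ans  -- unreachable: l is nonempty here

-- ===== PORT B =====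
def intercalate_alt (l : List (List Int)) (sep : Int) : List Int :=
  let out : List Int := l.flatMap (fun sub => [sep] ++ sub)
  PySem.List.slice out (some 1) none

-- ===== PRECONDITION & SPEC =====
def Spec_intercalate (l : List (List Int)) (sep : Int) (out : List Int) : Prop := out = intercalate_alt l sep
instance (l : List (List Int)) (sep : Int) (out : List Int) : Decidable (Spec_intercalate l sep out) := by unfold Spec_intercalate; infer_instance

-- ===== CLAIM =====
def Claim_equal_intercalate : Prop := ∀ (l : List (List Int)) (sep : Int), Dom_intercalate l sep → Spec_intercalate l sep (intercalate l sep)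

-- ===== LEMMAS AND PROOFS =====

theorem foldlA_shift (sep : Int) (xs : List (List Int)) (a : List Int) :
    xs.foldl (fun ans i => ans ++ i ++ [sep]) a
      = a ++ xs.foldl (fun ans i => ans ++ i ++ [sep]) [] := by
  induction xs generalizing a with
  | nil => simp
  | cons x xs ih =>
      simp only [List.foldl_cons]
      rw [ih (a ++ x ++ [sep]), ih ([] ++ x ++ [sep])]
      simp

theorem A_eq (sep : Int) (l : List (List Int)) :
    intercalate l sep
      = match l with
        | [] => []
        | x :: xs => x ++ xs.flatMap (fun i => sep :: i) := by
  induction l with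
  | nil => rfl
  | cons x xs ih =>
      cases xs with
      | nil => simp [intercalate, PySem.List.slice_to_neg_one, PySem.List.pyGet?_neg_one]
      | cons y ys =>
          simp only [intercalate, PySem.List.slice_to_neg_one, PySem.List.pyGet?_neg_one,
            List.isEmpty_cons, Bool.false_eq_true, if_false] at ih ⊢
          cases hg : (y :: ys).getLast? with
          | none => simp at hg
          | some last =>
              rw [hg] at ih
              rw [List.getLast?_cons_cons, hg,
                List.dropLast_cons_of_ne_nil (by simp : (y :: ys : List (List Int)) ≠ []),
                List.foldl_cons, List.nil_append, foldlA_shift]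
              simp only [List.append_assoc] at ih ⊢
              rw [ih]
              simp

theorem B_eq (sep : Int) (l : List (List Int)) :
    intercalate_alt l sep
      = match l with
        | [] => []
        | x :: xs => x ++ xs.flatMap (fun i => sep :: i) := by
  cases l with
  | nil => rfl
  | cons x xs =>
      simp only [intercalate_alt, List.flatMap_cons, PySem.List.slice_from_one]
      simp

-- ===== VERDICT =====
theorem intercalate_spec : Claim_equal_intercalate := by
  intro l sep _
  unfold Spec_intercalate
  rw [A_eq, B_eq]
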